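-- pv_equiv track=rewrite | github.com/Dedoyes/tumor | src/utilize.py | finalNum
-- ===== SOURCE A (Python) =====
-- def finalNum (fileName) :
--     length = len (fileName)
--     res = ""
--     for i in range (length - 1, -1, -1) :
--         if (fileName[i] == '.') :
--             break
--         res = res + fileName[i]
--     realName = ''.join (reversed (res))
--     return realName
-- ===== SOURCE B (Python) =====
-- def finalNum(fileName):
--     last = -1
--     for i, c in enumerate(fileName):
--         if c == '.':
--             last = i
--     return fileName[last + 1:]
-- ===== Notes on version B (the rewrite author's own statement) =====
-- stated objective: faster
-- what changed: Replaces A's backward break-early scan that builds the result by repeated string concatenation and then reverses it with a single forward pass that tracks the index of the last dot and returns one slice fileName[last+1:].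
import Mathlib
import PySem

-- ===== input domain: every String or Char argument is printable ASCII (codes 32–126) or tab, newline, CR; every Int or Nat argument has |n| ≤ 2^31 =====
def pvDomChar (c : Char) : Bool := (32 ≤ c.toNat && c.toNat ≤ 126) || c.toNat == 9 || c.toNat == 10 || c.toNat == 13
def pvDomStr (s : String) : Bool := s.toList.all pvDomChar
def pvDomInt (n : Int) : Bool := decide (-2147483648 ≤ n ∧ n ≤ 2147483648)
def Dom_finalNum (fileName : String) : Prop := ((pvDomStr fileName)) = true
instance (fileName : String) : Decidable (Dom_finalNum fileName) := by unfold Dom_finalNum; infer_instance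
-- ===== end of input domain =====

-- B replaces A's backward break-early scan (collect chars, then reverse) with a single
-- forward pass recording the last dot's index and one slice fileName[last+1:] (alternative).

-- ===== PORT A =====
-- the downward loop 'for i in range(length-1, -1, -1)' as recursion on the index counter;
-- break on '.' returns res; cs[i]? is always some here (i < length)
def finalNumLoopA (cs : List Char) : Nat → List Char → List Char
  | 0, res => res
  | i + 1, res =>
    match cs[i]? with
    | some c => if c = '.' then res else finalNumLoopA cs i (res ++ [c])
    | none => res

def finalNum (fileName : String) : String :=
  let cs := fileName.toList
  let res := finalNumLoopA cs cs.length []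
  String.mk res.reverse

-- ===== PORT B =====
def finalNum_alt (fileName : String) : String :=
  let cs := fileName.toList
  let last := (PySem.List.enumerate cs 0).foldl
    (fun last ic => if ic.2 = '.' then ic.1 else last) (-1)
  String.mk (PySem.List.slice cs (some (last + 1)) none)

-- ===== PRECONDITION & SPEC =====
def Spec_finalNum (fileName : String) (out : String) : Prop := out = finalNum_alt fileName
instance (fileName : String) (out : String) : Decidable (Spec_finalNum fileName out) := by unfold Spec_finalNum; infer_instance

-- ===== CLAIM (what is proved, stated in full; the proofs are below) =====
def Claim_equal_finalNum : Prop := ∀ (fileName : String), Dom_finalNum fileName → Spec_finalNum fileName (finalNum fileName)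

-- ===== LEMMAS AND PROOFS =====

-- A's loop collects the characters after the last dot, back to front
theorem finalNumLoopA_eq (cs : List Char) :
    ∀ (i : Nat), i ≤ cs.length → ∀ (acc : List Char),
      finalNumLoopA cs i acc = acc ++ (cs.take i).reverse.takeWhile (fun c => c ≠ '.') := by
  intro i
  induction i with
  | zero => intro _ acc; simp [finalNumLoopA]
  | succ i ih =>
    intro hle acc
    have hi : i < cs.length := by omega
    have hget : cs[i]? = some cs[i] := List.getElem?_eq_getElem hi
    have htake : cs.take (i + 1) = cs.take i ++ [cs[i]] := by
      simpa using (List.take_concat_get hi).symm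
    by_cases hc : cs[i] = '.'
    · simp [finalNumLoopA, hget, hc, htake]
    · simp only [finalNumLoopA, hget, if_neg hc, htake, List.reverse_append,
        List.reverse_cons, List.reverse_nil, List.nil_append, List.singleton_append,
        List.takeWhile_cons]
      rw [ih (by omega)]
      simp [hc]

-- B's fold, named for the proofs
def lastDotFold (cs : List Char) : Int :=
  (PySem.List.enumerate cs 0).foldl (fun last ic => if ic.2 = '.' then ic.1 else last) (-1)

theorem lastDotFold_append (cs : List Char) (c : Char) :
    lastDotFold (cs ++ [c]) = if c = '.' then (cs.length : Int) else lastDotFold cs := by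
  unfold lastDotFold
  rw [PySem.List.enumerate_append]
  simp [PySem.List.enumerate_cons, PySem.List.enumerate_nil, List.foldl_append]

-- B's fold: the last-dot index is in [-1, length), and dropping past it yields
-- exactly the reversed take-until-dot of the reversed list
theorem lastDot_spec (cs : List Char) :
    -1 ≤ lastDotFold cs ∧ lastDotFold cs < (cs.length : Int) ∧
      cs.drop (lastDotFold cs + 1).toNat = (cs.reverse.takeWhile (fun c => c ≠ '.')).reverse := by
  induction cs using List.reverseRecOn with
  | nil => simp [lastDotFold, PySem.List.enumerate]
  | append_singleton cs c ih =>
    obtain ⟨h1, h2, h3⟩ := ih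
    rw [lastDotFold_append]
    by_cases hc : c = '.'
    · rw [if_pos hc]
      refine ⟨by omega, by simp, ?_⟩
      have : ((cs.length : Int) + 1).toNat = cs.length + 1 := by omega
      simp [this, hc]
    · rw [if_neg hc]
      refine ⟨h1, ?_, ?_⟩
      · simp; omega
      · have hlen : (lastDotFold cs + 1).toNat ≤ cs.length := by omega
        rw [List.drop_append_of_le_length hlen, h3]
        simp [hc]

theorem finalNum_eq_common (s : String) :
    finalNum s = String.mk ((s.toList.reverse.takeWhile (fun c => c ≠ '.')).reverse) := by
  show String.mk (finalNumLoopA s.toList s.toList.length []).reverse = _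
  rw [finalNumLoopA_eq s.toList s.toList.length (le_refl _) []]
  rw [List.take_length]
  simp

theorem finalNum_alt_eq_common (s : String) :
    finalNum_alt s = String.mk ((s.toList.reverse.takeWhile (fun c => c ≠ '.')).reverse) := by
  show String.mk (PySem.List.slice s.toList (some (lastDotFold s.toList + 1)) none) = _
  obtain ⟨h1, h2, h3⟩ := lastDot_spec s.toList
  rw [PySem.List.slice_from _ (by omega), h3]

-- ===== VERDICT (by name: the statement is the Claim_ definition above) =====
theorem finalNum_spec : Claim_equal_finalNum := by
  intro s _
  unfold Spec_finalNum
  rw [finalNum_eq_common, finalNum_alt_eq_common]
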